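-- pv_equiv track=rewrite | github.com/ZuhabWasim/CSC148H1 | testing/postage.py | postage
-- ===== SOURCE A (Python) =====
-- def postage(n: int):
--     """ Number of ways for n
--     n = 3i + 4j + 5k
--     """
--     ways = []
--     count = 0
--     for i in range(n):
--         for j in range(n):
--             for k in range(n):
--                 if n == 3 * i + 4 * j + 5 * k and (i, j, k) not in ways:
--                     ways.append((i, j, k))
--                     count += 1
--     # return ways
--     return count
-- ===== SOURCE B (Python) =====
-- def postage(n: int):
--     """ Number of ways for n
--     n = 3i + 4j + 5k
--     """
--     count = 0
--     for i in range(n):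
--         for j in range(n):
--             rem = n - 3 * i - 4 * j
--             if rem >= 0 and rem % 5 == 0:
--                 count += 1
--     return count
-- ===== Notes on version B (the rewrite author's own statement) =====
-- stated objective: faster
-- what changed: Replaced the cubic triple loop with a list-membership dedup check by a double loop that solves for k arithmetically (rem = n-3i-4j divisible by 5), dropping the ways list entirely.
import Mathlib
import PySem

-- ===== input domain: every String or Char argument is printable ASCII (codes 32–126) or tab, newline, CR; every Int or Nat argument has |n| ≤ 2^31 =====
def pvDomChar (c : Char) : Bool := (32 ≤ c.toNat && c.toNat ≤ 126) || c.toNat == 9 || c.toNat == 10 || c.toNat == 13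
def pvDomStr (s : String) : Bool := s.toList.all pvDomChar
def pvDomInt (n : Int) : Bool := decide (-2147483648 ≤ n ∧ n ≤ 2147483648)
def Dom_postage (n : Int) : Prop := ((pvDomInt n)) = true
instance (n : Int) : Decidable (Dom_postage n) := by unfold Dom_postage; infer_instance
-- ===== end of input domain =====

-- B replaces A's O(n^3) triple loop (with a list-membership dedup) by an O(n^2)
-- double loop that solves for k arithmetically; measured asymptotically faster.

-- ===== PORT A =====
def stepK (n i j : Int) (st : List (Int × Int × Int) × Int) (k : Int) :
    List (Int × Int × Int) × Int :=
  if n = 3 * i + 4 * j + 5 * k ∧ (i, j, k) ∉ st.1 then (st.1 ++ [(i, j, k)], st.2 + 1) else st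

def stepJ (n i : Int) (st : List (Int × Int × Int) × Int) (j : Int) :
    List (Int × Int × Int) × Int :=
  (PySem.List.pyRange 0 n 1).foldl (stepK n i j) st

def stepI (n : Int) (st : List (Int × Int × Int) × Int) (i : Int) :
    List (Int × Int × Int) × Int :=
  (PySem.List.pyRange 0 n 1).foldl (stepJ n i) st

def postage (n : Int) : Int :=
  ((PySem.List.pyRange 0 n 1).foldl (stepI n) ([], 0)).2

-- ===== PORT B =====
def bstepJ (n i : Int) (c : Int) (j : Int) : Int :=
  let rem := n - 3 * i - 4 * j
  if 0 ≤ rem ∧ PySem.Int.mod rem 5 = 0 then c + 1 else c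

def bstepI (n : Int) (c : Int) (i : Int) : Int :=
  (PySem.List.pyRange 0 n 1).foldl (bstepJ n i) c

def postage_alt (n : Int) : Int :=
  (PySem.List.pyRange 0 n 1).foldl (bstepI n) 0

-- ===== PRECONDITION & SPEC =====
def Spec_postage (n : Int) (out : Int) : Prop := out = postage_alt n
instance (n : Int) (out : Int) : Decidable (Spec_postage n out) := by unfold Spec_postage; infer_instance

-- ===== CLAIM (what is proved, stated in full; the proofs are below) =====
def Claim_equal_postage : Prop := ∀ (n : Int), Dom_postage n → Spec_postage n (postage n)

-- ===== LEMMAS AND PROOFS =====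

-- Inner k-loop: since the k's are distinct and no (i,j,·) is already in ways,
-- the membership test never fires; the loop appends the solutions and counts them.
lemma innerK (n i j : Int) : ∀ (L : List Int), L.Nodup →
    ∀ (ways : List (Int × Int × Int)) (c : Int), (∀ k ∈ L, (i, j, k) ∉ ways) →
    L.foldl (stepK n i j) (ways, c) =
      (ways ++ (L.filter (fun k => decide (n = 3 * i + 4 * j + 5 * k))).map (fun k => (i, j, k)),
       c + ((L.countP (fun k => decide (n = 3 * i + 4 * j + 5 * k)) : Nat) : Int)) := by
  intro L
  induction L with
  | nil => intro _ ways c _; simp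
  | cons k L ih =>
    intro hnd ways c h
    have hk : (i, j, k) ∉ ways := h k (by simp)
    have hnd' := (List.nodup_cons.mp hnd)
    by_cases hc : n = 3 * i + 4 * j + 5 * k
    · have hstep : stepK n i j (ways, c) k = (ways ++ [(i, j, k)], c + 1) := by
        simp [stepK, hc, hk]
      rw [List.foldl_cons, hstep, ih hnd'.2 _ _ ?_]
      · simp [hc, List.append_assoc]
        omega
      · intro k' hk' hmem
        rcases List.mem_append.mp hmem with hm | hm
        · exact h k' (by simp [hk']) hm
        · simp at hm
          exact hnd'.1 (hm ▸ hk')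
    · have hstep : stepK n i j (ways, c) k = (ways, c) := by
        simp [stepK, hc]
      rw [List.foldl_cons, hstep, ih hnd'.2 _ _ (fun k' hk' => h k' (by simp [hk']))]
      simp [hc]

-- Counting k ∈ [0, m) with r = 5k.
lemma cntAux (r : Int) : ∀ (m : Nat),
    (((List.range m).countP (fun kn : Nat => decide (r = 5 * (kn : Int))) : Nat) : Int) =
      if 0 ≤ r ∧ r % 5 = 0 ∧ r / 5 < (m : Int) then 1 else 0 := by
  intro m
  induction m with
  | zero => simp; omega
  | succ m ih =>
    rw [List.range_succ, List.countP_append]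
    push_cast
    rw [ih]
    simp [List.countP_cons]
    split_ifs <;> push_cast <;> omega

-- The k-count over range(n) equals B's divisibility test (given 0 ≤ i < n, 0 ≤ j).
lemma countPy (n i j : Int) (hi0 : 0 ≤ i) (hin : i < n) (hj0 : 0 ≤ j) :
    (((PySem.List.pyRange 0 n 1).countP (fun k => decide (n = 3 * i + 4 * j + 5 * k)) : Nat) : Int) =
      if 0 ≤ n - 3 * i - 4 * j ∧ PySem.Int.mod (n - 3 * i - 4 * j) 5 = 0 then 1 else 0 := by
  rw [PySem.List.pyRange_one]
  rw [List.countP_map]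
  have hcongr : (List.range (n - 0).toNat).countP
        ((fun k => decide (n = 3 * i + 4 * j + 5 * k)) ∘ (fun k : Nat => (0 : Int) + k)) =
      (List.range (n - 0).toNat).countP (fun kn : Nat => decide ((n - 3 * i - 4 * j) = 5 * (kn : Int))) := by
    apply List.countP_congr
    intro a _
    simp only [Function.comp, decide_eq_true_iff]
    omega
  rw [hcongr, cntAux]
  rw [PySem.Int.mod_eq_emod_of_pos (by norm_num : (0:Int) < 5)]
  have hr : n - 3 * i - 4 * j ≤ n := by omega
  split_ifs <;> omega

-- Middle j-loop: A's fold appends only triples with first component i, and its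
-- count advances exactly like B's inner loop.
lemma foldJ (n i : Int) (hi : 0 ≤ i ∧ i < n) : ∀ (L : List Int), L.Nodup →
    (∀ j ∈ L, 0 ≤ j) →
    ∀ (ways : List (Int × Int × Int)) (c : Int), (∀ j ∈ L, ∀ k, (i, j, k) ∉ ways) →
    ∃ ws, L.foldl (stepJ n i) (ways, c) = (ways ++ ws, L.foldl (bstepJ n i) c) ∧
      ∀ t ∈ ws, t.1 = i := by
  intro L
  induction L with
  | nil => intro _ _ ways c _; exact ⟨[], by simp, by simp⟩
  | cons j L ih =>
    intro hnd hpos ways c h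
    have hnd' := List.nodup_cons.mp hnd
    have hstep : stepJ n i (ways, c) j =
        (ways ++ ((PySem.List.pyRange 0 n 1).filter
            (fun k => decide (n = 3 * i + 4 * j + 5 * k))).map (fun k => (i, j, k)),
         bstepJ n i c j) := by
      rw [stepJ, innerK n i j _ (PySem.List.nodup_pyRange_one 0 n) _ _ (fun k _ => h j (by simp) k)]
      rw [countPy n i j hi.1 hi.2 (hpos j (by simp))]
      simp only [bstepJ]
      split_ifs <;> simp
    set sols := ((PySem.List.pyRange 0 n 1).filter
        (fun k => decide (n = 3 * i + 4 * j + 5 * k))).map (fun k => (i, j, k)) with hsols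
    have hsolsfst : ∀ t ∈ sols, t.1 = i ∧ t.2.1 = j := by
      intro t ht
      rcases List.mem_map.mp ht with ⟨k, _, hk⟩
      simp [← hk]
    have hnext : ∀ j' ∈ L, ∀ k, (i, j', k) ∉ ways ++ sols := by
      intro j' hj' k hmem
      rcases List.mem_append.mp hmem with hm | hm
      · exact h j' (by simp [hj']) k hm
      · have := (hsolsfst _ hm).2
        simp at this
        exact hnd'.1 (this ▸ hj')
    obtain ⟨ws2, hws2, hws2fst⟩ := ih hnd'.2 (fun j' hj' => hpos j' (by simp [hj'])) (ways ++ sols)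
      (bstepJ n i c j) hnext
    refine ⟨sols ++ ws2, ?_, ?_⟩
    · rw [List.foldl_cons, hstep, hws2, List.foldl_cons, List.append_assoc]
    · intro t ht
      rcases List.mem_append.mp ht with hm | hm
      · exact (hsolsfst t hm).1
      · exact hws2fst t hm

-- Outer i-loop.
lemma foldI (n : Int) : ∀ (L : List Int), L.Nodup → (∀ i ∈ L, 0 ≤ i ∧ i < n) →
    ∀ (ways : List (Int × Int × Int)) (c : Int), (∀ t ∈ ways, ∀ i ∈ L, t.1 ≠ i) →
    ∃ ws, L.foldl (stepI n) (ways, c) = (ways ++ ws, L.foldl (bstepI n) c) := by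
  intro L
  induction L with
  | nil => intro _ _ ways c _; exact ⟨[], by simp⟩
  | cons i L ih =>
    intro hnd hbnd ways c h
    have hnd' := List.nodup_cons.mp hnd
    obtain ⟨ws1, hws1, hws1fst⟩ := foldJ n i (hbnd i (by simp)) (PySem.List.pyRange 0 n 1)
      (PySem.List.nodup_pyRange_one 0 n)
      (fun j hj => (PySem.List.mem_pyRange_one.mp hj).1) ways c
      (fun j _ k hmem => (h _ hmem i (by simp) rfl).elim)
    have hnext : ∀ t ∈ ways ++ ws1, ∀ i' ∈ L, t.1 ≠ i' := by
      intro t ht i' hi'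
      rcases List.mem_append.mp ht with hm | hm
      · exact h t hm i' (by simp [hi'])
      · rw [hws1fst t hm]
        intro heq
        exact hnd'.1 (heq ▸ hi')
    obtain ⟨ws2, hws2⟩ := ih hnd'.2 (fun i' hi' => hbnd i' (by simp [hi'])) (ways ++ ws1)
      (bstepI n c i) hnext
    refine ⟨ws1 ++ ws2, ?_⟩
    rw [List.foldl_cons, show stepI n (ways, c) i = (ways ++ ws1, bstepI n c i) from hws1,
      hws2, List.foldl_cons, List.append_assoc]

-- ===== VERDICT (by name: the statement is the Claim_ definition above) =====
theorem postage_spec : Claim_equal_postage := by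
  intro n _
  unfold Spec_postage postage postage_alt
  obtain ⟨ws, hws⟩ := foldI n (PySem.List.pyRange 0 n 1) (PySem.List.nodup_pyRange_one 0 n)
    (fun i hi => PySem.List.mem_pyRange_one.mp hi) [] 0 (by simp)
  rw [hws]
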